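-- pv_equiv track=rewrite | github.com/pierre-chaville/edgar-contract-dataset | normalize.py | normalize_contract_type
-- ===== SOURCE A (Python) =====
-- from typing import Any, Dict, List, Optional
--
-- def normalize_contract_type(
--     mapping: Dict[str, Dict[str, Optional[str]]],
--     contract_category: Optional[str],
--     contract_type: Optional[str],
-- ) -> Optional[str]:
--     # Require a candidate type; category is optional
--     if not contract_type:
--         return None
--
--     type_value = str(contract_type).strip()
--     lower_value = type_value.lower()
--
--     # If a category is provided, attempt within that section first
--     category_key = str(contract_category).strip().lower() if contract_category else None
--     if category_key:
--         section = mapping.get(category_key) or mapping.get("other", {})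
--         # 1) Direct exact match
--         if type_value in section:
--             return section[type_value]
--         # 2) Case-insensitive match
--         for k, v in section.items():
--             if k.lower() == lower_value:
--                 return v
--         # 3) Try explicit 'other' section if not already used
--         if category_key != "other" and "other" in mapping:
--             other_section = mapping["other"]
--             if type_value in other_section:
--                 return other_section[type_value]
--             for k, v in other_section.items():
--                 if k.lower() == lower_value:
--                     return v
--
--     # If no category or not found above, search 'other' then any section
--     if "other" in mapping:
--         other_section2 = mapping["other"]
--         if type_value in other_section2:
--             return other_section2[type_value]
--         for k, v in other_section2.items():
--             if k.lower() == lower_value: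
--                 return v
--
--     # Cross-section search as a last resort
--     for section_name, section in mapping.items():
--         if section_name == "other":
--             continue
--         if type_value in section:
--             return section[type_value]
--         for k, v in section.items():
--             if k.lower() == lower_value:
--                 return v
--
--     return None
-- ===== SOURCE B (Python) =====
-- def normalize_contract_type(mapping, contract_category, contract_type):
--     if not contract_type:
--         return None
--     type_value = str(contract_type).strip()
--     lower_value = type_value.lower()
--     category_key = str(contract_category).strip().lower() if contract_category else None
--
--     other = mapping.get("other")
--     sections = []
--     if category_key:
--         sections.append(mapping.get(category_key) or other or {})
--         if category_key != "other" and other is not None: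
--             sections.append(other)
--     if other is not None:
--         sections.append(other)
--     sections += [sec for name, sec in mapping.items() if name != "other"]
--
--     # Score every matching entry everywhere, then pick the globally best one:
--     # lower (section_rank, non_exactness) wins; ties go to the earliest entry.
--     candidates = [
--         (rank, 0 if k == type_value else 1, v)
--         for rank, sec in enumerate(sections)
--         for k, v in sec.items()
--         if k.lower() == lower_value
--     ]
--     if not candidates:
--         return None
--     return min(candidates, key=lambda c: (c[0], c[1]))[2]
-- ===== Notes on version B (the rewrite author's own statement) =====
-- stated objective: alternative
-- what changed: A's staged early-return probing (four copy-pasted exact-then-case-insensitive blocks with repeated 'other' retries) is replaced by building the ordered candidate-section list once, scoring every case-insensitive hit across all sections as a (section_rank, non_exactness, value) tuple in one comprehension, and returning the global argmin of those scores.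
import Mathlib
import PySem

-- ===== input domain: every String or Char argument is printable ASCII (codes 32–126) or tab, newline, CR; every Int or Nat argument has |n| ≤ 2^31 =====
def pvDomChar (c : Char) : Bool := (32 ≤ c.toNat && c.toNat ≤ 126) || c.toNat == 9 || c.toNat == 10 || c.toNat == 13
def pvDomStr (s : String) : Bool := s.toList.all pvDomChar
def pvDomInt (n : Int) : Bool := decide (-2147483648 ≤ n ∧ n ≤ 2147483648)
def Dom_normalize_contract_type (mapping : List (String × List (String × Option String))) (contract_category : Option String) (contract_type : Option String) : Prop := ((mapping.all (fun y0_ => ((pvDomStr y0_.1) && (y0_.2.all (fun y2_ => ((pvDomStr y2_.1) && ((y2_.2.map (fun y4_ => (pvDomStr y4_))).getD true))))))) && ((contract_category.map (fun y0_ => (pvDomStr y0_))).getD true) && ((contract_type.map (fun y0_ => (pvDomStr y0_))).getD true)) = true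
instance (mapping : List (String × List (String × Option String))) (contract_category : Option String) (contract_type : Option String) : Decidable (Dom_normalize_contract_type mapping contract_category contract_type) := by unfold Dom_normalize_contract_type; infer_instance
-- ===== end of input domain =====

-- B replaces A's staged early-return probing (four copy-pasted exact-then-case-insensitive blocks)
-- by scoring every case-insensitive hit across all candidate sections at once as
-- (section_rank, non_exactness, value) and returning the global argmin (objective: simpler).

-- ===== PORT A =====
-- 'for k, v in sect.items(): if k.lower() == lower_value: return v' (none = fell through)
def pvA_ci (sect : List (String × Option String)) (lv : String) : Option (Option String) :=
  match sect with
  | [] => none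
  | (k, v) :: rest => if PySem.Str.lower k = lv then some v else pvA_ci rest lv

-- the final cross-section loop; the trailing 'return None' is merged into the [] case
def pvA_cross (ms : List (String × List (String × Option String))) (tv lv : String) : Option String :=
  match ms with
  | [] => none
  | (name, sec) :: rest =>
    if name = "other" then pvA_cross rest tv lv
    else
      match (PySem.Dict.mk sec).get? tv with
      | some v => v
      | none =>
        match pvA_ci sec lv with
        | some r => r
        | none => pvA_cross rest tv lv

def normalize_contract_type (mapping : List (String × List (String × Option String))) (contract_category : Option String) (contract_type : Option String) : Option String :=
  match contract_type with
  | none => none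
  | some ct0 =>
    if ct0 = "" then none
    else
      let tv := PySem.Str.strip ct0
      let lv := PySem.Str.lower tv
      let ck : Option String :=
        match contract_category with
        | none => none
        | some c => if c = "" then none else some (PySem.Str.lower (PySem.Str.strip c))
      -- 'if category_key:' block, as Option (Option String): some r = early return r
      let step1 : Option (Option String) :=
        match ck with
        | none => none
        | some k =>
          if k ≠ "" then
            let sec :=
              match (PySem.Dict.mk mapping).get? k with
              | some s => if s = [] then ((PySem.Dict.mk mapping).get? "other").getD [] else s
              | none => ((PySem.Dict.mk mapping).get? "other").getD []
            match (PySem.Dict.mk sec).get? tv with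
            | some v => some v
            | none =>
              match pvA_ci sec lv with
              | some r => some r
              | none =>
                if k ≠ "other" ∧ (PySem.Dict.mk mapping).contains "other" then
                  let os := ((PySem.Dict.mk mapping).get? "other").getD []
                  match (PySem.Dict.mk os).get? tv with
                  | some v => some v
                  | none => pvA_ci os lv
                else none
          else none
      match step1 with
      | some r => r
      | none =>
        -- 'if "other" in mapping:' block
        let step2 : Option (Option String) :=
          if (PySem.Dict.mk mapping).contains "other" then
            let os := ((PySem.Dict.mk mapping).get? "other").getD []
            match (PySem.Dict.mk os).get? tv with
            | some v => some v
            | none => pvA_ci os lv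
          else none
        match step2 with
        | some r => r
        | none => pvA_cross mapping tv lv

-- ===== PORT B =====
-- the candidates comprehension: one (rank, 0-if-exact-else-1, value) per case-insensitive hit
def pvB_cands (secs : List (List (String × Option String))) (tv lv : String) : List (Int × Int × Option String) :=
  (PySem.List.enumerate secs).flatMap (fun p =>
    p.2.filterMap (fun kv =>
      if PySem.Str.lower kv.1 = lv then some (p.1, (if kv.1 = tv then (0 : Int) else 1), kv.2)
      else none))

def normalize_contract_type_alt (mapping : List (String × List (String × Option String))) (contract_category : Option String) (contract_type : Option String) : Option String :=
  match contract_type with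
  | none => none
  | some ct0 =>
    if ct0 = "" then none
    else
      let tv := PySem.Str.strip ct0
      let lv := PySem.Str.lower tv
      let ck : Option String :=
        match contract_category with
        | none => none
        | some c => if c = "" then none else some (PySem.Str.lower (PySem.Str.strip c))
      let other := (PySem.Dict.mk mapping).get? "other"
      let sections : List (List (String × Option String)) :=
        (match ck with
         | none => []
         | some k =>
           if k ≠ "" then
             [ match (PySem.Dict.mk mapping).get? k with
               | some s => if s = [] then other.getD [] else s
               | none => other.getD [] ] ++
             (if k ≠ "other" ∧ other.isSome then [other.getD []] else [])
           else []) ++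
        (if other.isSome then [other.getD []] else []) ++
        (mapping.filter (fun p => p.1 ≠ "other")).map Prod.snd
      let cands := pvB_cands sections tv lv
      -- 'if not candidates: return None; return min(candidates, key=lambda c: (c[0], c[1]))[2]'
      match PySem.List.min2? cands (fun c => c.1) (fun c => c.2.1) with
      | none => none
      | some c => c.2.2

-- ===== PRECONDITION & SPEC =====
def Spec_normalize_contract_type (mapping : List (String × List (String × Option String))) (contract_category : Option String) (contract_type : Option String) (out : Option String) : Prop := out = normalize_contract_type_alt mapping contract_category contract_type
instance (mapping : List (String × List (String × Option String))) (contract_category : Option String) (contract_type : Option String) (out : Option String) : Decidable (Spec_normalize_contract_type mapping contract_category contract_type out) := by unfold Spec_normalize_contract_type; infer_instance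

-- ===== CLAIM (what is proved, stated in full; the proofs are below) =====
def Claim_equal_normalize_contract_type : Prop := ∀ (mapping : List (String × List (String × Option String))) (contract_category : Option String) (contract_type : Option String), Dom_normalize_contract_type mapping contract_category contract_type → Spec_normalize_contract_type mapping contract_category contract_type (normalize_contract_type mapping contract_category contract_type)

-- ===== LEMMAS AND PROOFS =====

-- Proof-side intermediate: the sequential first-hit walk over the candidate sections.
def pvB_exact (sect : List (String × Option String)) (tv : String) : Option (Option String) :=
  match sect with
  | [] => none
  | (k, v) :: rest => if k = tv then some v else pvB_exact rest tv

def pvB_lookup (sect : List (String × Option String)) (tv lv : String) : Option (Option String) :=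
  match pvB_exact sect tv with
  | some v => some v
  | none => pvA_ci sect lv

def pvB_first (secs : List (List (String × Option String))) (tv lv : String) : Option String :=
  match secs with
  | [] => none
  | s :: rest =>
    match pvB_lookup s tv lv with
    | some r => r
    | none => pvB_first rest tv lv

-- Proof-side: A rewritten as that sequential walk over the explicit section list.
def pvSeqAlt (mapping : List (String × List (String × Option String))) (contract_category : Option String) (contract_type : Option String) : Option String :=
  match contract_type with
  | none => none
  | some ct0 =>
    if ct0 = "" then none
    else
      let tv := PySem.Str.strip ct0
      let lv := PySem.Str.lower tv
      let ck : Option String :=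
        match contract_category with
        | none => none
        | some c => if c = "" then none else some (PySem.Str.lower (PySem.Str.strip c))
      let other := (PySem.Dict.mk mapping).get? "other"
      let sections : List (List (String × Option String)) :=
        (match ck with
         | none => []
         | some k =>
           if k ≠ "" then
             [ match (PySem.Dict.mk mapping).get? k with
               | some s => if s = [] then other.getD [] else s
               | none => other.getD [] ] ++
             (if k ≠ "other" ∧ other.isSome then [other.getD []] else [])
           else []) ++
        (if other.isSome then [other.getD []] else []) ++
        (mapping.filter (fun p => p.1 ≠ "other")).map Prod.snd
      pvB_first sections tv lv

-- ===== part 1: A = pvSeqAlt (the staged probing equals the sequential walk) =====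

theorem pvB_exact_eq_get? (sect : List (String × Option String)) (tv : String) :
    pvB_exact sect tv = (PySem.Dict.mk sect).get? tv := by
  induction sect with
  | nil => simp [pvB_exact, PySem.Dict.get?]
  | cons kv rest ih =>
    obtain ⟨k, v⟩ := kv
    rw [pvB_exact, PySem.Dict.get?_mk_cons]
    simp only [beq_iff_eq]
    split_ifs with h
    · rfl
    · exact ih

theorem pvB_lookup_eq (sect : List (String × Option String)) (tv lv : String) :
    pvB_lookup sect tv lv =
      (match (PySem.Dict.mk sect).get? tv with
       | some v => some v
       | none => pvA_ci sect lv) := by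
  rw [pvB_lookup, pvB_exact_eq_get?]

theorem pvA_cross_eq (ms : List (String × List (String × Option String))) (tv lv : String) :
    pvA_cross ms tv lv = pvB_first ((ms.filter (fun p => p.1 ≠ "other")).map Prod.snd) tv lv := by
  induction ms with
  | nil => rfl
  | cons p rest ih =>
    obtain ⟨name, sec⟩ := p
    rw [pvA_cross]
    by_cases h : name = "other"
    · simp [h, ih]
    · rw [pvB_first.eq_def]
      simp only [pvB_lookup_eq, if_neg h]
      rcases hg : (PySem.Dict.mk sec).get? tv with _ | v
      · rcases hc : pvA_ci sec lv with _ | r <;>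
          simp [h, hg, hc, ih]
      · simp [h, hg]

theorem tail_eq (m : List (String × List (String × Option String))) (tv lv : String) :
    (match
      (if (PySem.Dict.mk m).contains "other" then
        match (PySem.Dict.mk (((PySem.Dict.mk m).get? "other").getD [])).get? tv with
        | some v => some v
        | none => pvA_ci (((PySem.Dict.mk m).get? "other").getD []) lv
      else none : Option (Option String)) with
     | some r => r
     | none => pvA_cross m tv lv)
    = pvB_first ((if ((PySem.Dict.mk m).get? "other").isSome
                    then [((PySem.Dict.mk m).get? "other").getD []] else []) ++
                 (m.filter (fun p => p.1 ≠ "other")).map Prod.snd) tv lv := by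
  rw [PySem.Dict.contains_eq_isSome_get?]
  rcases hO : (PySem.Dict.mk m).get? "other" with _ | os
  · simp [pvA_cross_eq]
  · simp only [Option.isSome_some, if_true, Option.getD_some, List.cons_append,
      pvB_first, pvB_lookup_eq]
    rcases hg : (PySem.Dict.mk os).get? tv with _ | v
    · rcases hc : pvA_ci os lv with _ | r <;> simp [pvA_cross_eq]
    · simp

theorem A_eq_seq (mapping : List (String × List (String × Option String))) (cc ct : Option String) :
    normalize_contract_type mapping cc ct = pvSeqAlt mapping cc ct := by
  cases ct with
  | none => rfl
  | some ct0 =>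
    by_cases hct : ct0 = ""
    · simp [normalize_contract_type, pvSeqAlt, hct]
    · simp only [normalize_contract_type, pvSeqAlt, if_neg hct]
      generalize (PySem.Str.strip ct0) = tv
      generalize (PySem.Str.lower tv) = lv
      rcases cc with _ | c
      · simpa using tail_eq mapping tv lv
      · by_cases hc : c = ""
        · simpa [hc] using tail_eq mapping tv lv
        · simp only [if_neg hc]
          generalize (PySem.Str.lower (PySem.Str.strip c)) = k
          by_cases hk : k = ""
          · simpa [hk] using tail_eq mapping tv lv
          · simp only [ne_eq, not_false_iff, if_true, hk]
            generalize hsec :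
              (match (PySem.Dict.mk mapping).get? k with
               | some s => if s = [] then ((PySem.Dict.mk mapping).get? "other").getD [] else s
               | none => ((PySem.Dict.mk mapping).get? "other").getD []) = sec
            rcases hg : (PySem.Dict.mk sec).get? tv with _ | v
            · rcases hci : pvA_ci sec lv with _ | r
              · rw [PySem.Dict.contains_eq_isSome_get?]
                rcases hO : (PySem.Dict.mk mapping).get? "other" with _ | os
                · simp [hg, hci, pvB_first, pvB_lookup_eq, pvA_cross_eq]
                · by_cases hko : k = "other"
                  · simp only [hko, not_true_eq_false, false_and, if_false,
                      List.append_nil]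
                    simp [hg, hci, pvB_first, pvB_lookup_eq, pvA_cross_eq]
                  · simp only [hko, not_false_iff, Option.isSome_some, and_self,
                      if_true, Option.getD_some]
                    rcases hgo : (PySem.Dict.mk os).get? tv with _ | w
                    · rcases hco : pvA_ci os lv with _ | r2 <;>
                        simp [hg, hci, hgo, hco, pvB_first, pvB_lookup_eq, pvA_cross_eq]
                    · simp [hg, hci, hgo, pvB_first, pvB_lookup_eq]
              · simp [hg, hci, pvB_first, pvB_lookup_eq]
            · simp [hg, pvB_first, pvB_lookup_eq]

-- ===== part 2: B's argmin over scored candidates = pvSeqAlt's sequential walk =====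

-- the fold step of PySem.List.min2? at B's keys
def pvStep (acc : Option (Int × Int × Option String)) (x : Int × Int × Option String) :
    Option (Int × Int × Option String) :=
  match acc with
  | none => some x
  | some m =>
    if (decide (x.1 < m.1) || !decide (m.1 < x.1) && decide (x.2.1 < m.2.1)) = true
    then some x else some m

theorem min2?_eq_foldl (l : List (Int × Int × Option String)) :
    PySem.List.min2? l (fun c => c.1) (fun c => c.2.1) = l.foldl pvStep none := by
  unfold PySem.List.min2? pvStep
  apply PySem.List.foldl_congr_mem
  intro acc x _
  cases acc <;> rfl

-- one section's candidate entries, at rank i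
def pvCandsSec (i : Int) (sec : List (String × Option String)) (tv lv : String) :
    List (Int × Int × Option String) :=
  sec.filterMap (fun kv =>
    if PySem.Str.lower kv.1 = lv then some (i, (if kv.1 = tv then (0 : Int) else 1), kv.2)
    else none)

def pvAllCands (secs : List (List (String × Option String))) (i : Int) (tv lv : String) :
    List (Int × Int × Option String) :=
  (PySem.List.enumerate secs i).flatMap (fun p => pvCandsSec p.1 p.2 tv lv)

theorem pvB_cands_eq_all (secs : List (List (String × Option String))) (tv lv : String) :
    pvB_cands secs tv lv = pvAllCands secs 0 tv lv := rfl

theorem mem_pvCandsSec_rank (i : Int) (sec : List (String × Option String)) (tv lv : String)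
    (c : Int × Int × Option String) (hc : c ∈ pvCandsSec i sec tv lv) : c.1 = i := by
  simp only [pvCandsSec, List.mem_filterMap] at hc
  obtain ⟨kv, -, hkv⟩ := hc
  split_ifs at hkv
  · rw [Option.some.injEq] at hkv; subst hkv; rfl
  · rw [Option.some.injEq] at hkv; subst hkv; rfl

theorem mem_pvAllCands_rank (secs : List (List (String × Option String))) (i : Int)
    (tv lv : String) (c : Int × Int × Option String) (hc : c ∈ pvAllCands secs i tv lv) :
    i ≤ c.1 := by
  induction secs generalizing i with
  | nil => simp [pvAllCands, PySem.List.enumerate] at hc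
  | cons s rest ih =>
    rw [pvAllCands, PySem.List.enumerate_cons] at hc
    simp only [List.flatMap_cons, List.mem_append] at hc
    rcases hc with hc | hc
    · exact le_of_eq (mem_pvCandsSec_rank i s tv lv c hc).symm
    · have := ih (i + 1) hc
      omega

-- the fold never leaves an accumulator no later element beats
theorem foldl_stay_lt (l : List (Int × Int × Option String)) (m : Int × Int × Option String)
    (h : ∀ c ∈ l, m.1 < c.1) : l.foldl pvStep (some m) = some m := by
  induction l with
  | nil => rfl
  | cons c t ih =>
    have hm := h c (by simp)
    have : pvStep (some m) c = some m := by
      simp only [pvStep]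
      have h1 : decide (c.1 < m.1) = false := by simp; omega
      have h2 : decide (m.1 < c.1) = true := by simpa using hm
      simp [h1, h2]
    rw [List.foldl_cons, this]
    exact ih (fun c' hc' => h c' (by simp [hc']))

theorem pvCandsSec_cons (i : Int) (k : String) (v : Option String)
    (t : List (String × Option String)) (tv lv : String) :
    pvCandsSec i ((k, v) :: t) tv lv =
      (if PySem.Str.lower k = lv then [(i, (if k = tv then (0 : Int) else 1), v)] else []) ++
        pvCandsSec i t tv lv := by
  simp only [pvCandsSec, List.filterMap_cons]
  split_ifs <;> rfl

theorem foldl_stay_exact (l : List (String × Option String)) (i : Int) (tv lv : String)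
    (w : Option String) : (pvCandsSec i l tv lv).foldl pvStep (some (i, 0, w)) = some (i, 0, w) := by
  induction l with
  | nil => rfl
  | cons kv t ih =>
    obtain ⟨k, v⟩ := kv
    rw [pvCandsSec_cons]
    by_cases hk : PySem.Str.lower k = lv
    · rw [if_pos hk, List.singleton_append, List.foldl_cons]
      have hstep : pvStep (some (i, 0, w)) (i, (if k = tv then (0:Int) else 1), v) = some (i, 0, w) := by
        simp only [pvStep]
        have h1 : ¬ ((if k = tv then (0:Int) else 1) < 0) := by split_ifs <;> omega
        simp [h1]
      rw [hstep]
      exact ih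
    · rw [if_neg hk, List.nil_append]
      exact ih

theorem foldl_from_ci (l : List (String × Option String)) (i : Int) (tv lv : String)
    (hlv : PySem.Str.lower tv = lv) (v : Option String) :
    (pvCandsSec i l tv lv).foldl pvStep (some (i, 1, v)) =
      (match pvB_exact l tv with
       | some w => some (i, 0, w)
       | none => some (i, 1, v)) := by
  induction l with
  | nil => rfl
  | cons kv t ih =>
    obtain ⟨k, w⟩ := kv
    rw [pvCandsSec_cons, pvB_exact]
    by_cases hk : PySem.Str.lower k = lv
    · rw [if_pos hk, List.singleton_append, List.foldl_cons]
      by_cases he : k = tv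
      · rw [if_pos he, if_pos he]
        have hstep : pvStep (some (i, 1, v)) (i, (0:Int), w) = some (i, 0, w) := by
          simp [pvStep]
        rw [hstep, foldl_stay_exact]
      · rw [if_neg he, if_neg he]
        have hstep : pvStep (some (i, 1, v)) (i, (1:Int), w) = some (i, 1, v) := by
          simp [pvStep]
        rw [hstep, ih]
    · have he : k ≠ tv := fun h => hk (h ▸ hlv)
      rw [if_neg hk, List.nil_append, if_neg he]
      exact ih

-- per-section: the fold over one section's candidates = exact-first-then-CI, tagged
def pvTag (i : Int) (sec : List (String × Option String)) (tv lv : String) :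
    Option (Int × Int × Option String) :=
  match pvB_exact sec tv with
  | some w => some (i, 0, w)
  | none => (pvA_ci sec lv).map (fun v => (i, 1, v))

theorem foldl_sec (sec : List (String × Option String)) (i : Int) (tv lv : String)
    (hlv : PySem.Str.lower tv = lv) :
    (pvCandsSec i sec tv lv).foldl pvStep none = pvTag i sec tv lv := by
  induction sec with
  | nil => rfl
  | cons kv t ih =>
    obtain ⟨k, v⟩ := kv
    rw [pvCandsSec_cons]
    unfold pvTag
    rw [pvB_exact, pvA_ci]
    by_cases hk : PySem.Str.lower k = lv
    · rw [if_pos hk, List.singleton_append, List.foldl_cons]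
      rw [show pvStep none (i, (if k = tv then (0:Int) else 1), v) = some (i, (if k = tv then (0:Int) else 1), v) from rfl]
      by_cases he : k = tv
      · rw [if_pos he, if_pos he]
        exact foldl_stay_exact t i tv lv v
      · rw [if_neg he, if_neg he, if_pos hk]
        rw [foldl_from_ci t i tv lv hlv]
        rcases pvB_exact t tv with _ | w <;> rfl
    · have he : k ≠ tv := fun h => hk (h ▸ hlv)
      rw [if_neg hk, List.nil_append, if_neg he, if_neg hk]
      rw [ih]
      rfl

theorem pvTag_rank (i : Int) (sec : List (String × Option String)) (tv lv : String)
    (c : Int × Int × Option String) (h : pvTag i sec tv lv = some c) : c.1 = i := by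
  unfold pvTag at h
  rcases he : pvB_exact sec tv with _ | w
  · rw [he] at h
    rcases hc : pvA_ci sec lv with _ | v <;> rw [hc] at h
    · cases h
    · cases h; rfl
  · rw [he] at h; cases h; rfl

-- the tagged first hit of the sequential walk
def pvFirstTag (secs : List (List (String × Option String))) (i : Int) (tv lv : String) :
    Option (Int × Int × Option String) :=
  match secs with
  | [] => none
  | s :: rest =>
    match pvTag i s tv lv with
    | some c => some c
    | none => pvFirstTag rest (i + 1) tv lv

theorem foldl_all (secs : List (List (String × Option String))) (i : Int) (tv lv : String)
    (hlv : PySem.Str.lower tv = lv) :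
    (pvAllCands secs i tv lv).foldl pvStep none = pvFirstTag secs i tv lv := by
  induction secs generalizing i with
  | nil => rfl
  | cons s rest ih =>
    rw [pvAllCands, PySem.List.enumerate_cons]
    simp only [List.flatMap_cons, List.foldl_append]
    rw [show ((PySem.List.enumerate rest (i + 1)).flatMap fun p => pvCandsSec p.1 p.2 tv lv) = pvAllCands rest (i + 1) tv lv from rfl]
    rw [foldl_sec s i tv lv hlv]
    rcases ht : pvTag i s tv lv with _ | c
    · rw [pvFirstTag, ht]
      exact ih (i + 1)
    · rw [pvFirstTag, ht]
      have hrank := pvTag_rank i s tv lv c ht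
      exact foldl_stay_lt _ c (fun c' hc' => by
        have := mem_pvAllCands_rank rest (i + 1) tv lv c' hc'
        omega)

theorem tag_first (secs : List (List (String × Option String))) (i : Int) (tv lv : String) :
    (match pvFirstTag secs i tv lv with
     | none => none
     | some c => c.2.2) = pvB_first secs tv lv := by
  induction secs generalizing i with
  | nil => rfl
  | cons s rest ih =>
    rw [pvFirstTag, pvB_first, pvB_lookup]
    unfold pvTag
    rcases he : pvB_exact s tv with _ | w
    · rcases hc : pvA_ci s lv with _ | v
      · simpa using ih (i + 1)
      · rfl
    · rfl

theorem search_eq (secs : List (List (String × Option String))) (tv lv : String)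
    (hlv : PySem.Str.lower tv = lv) :
    (match PySem.List.min2? (pvB_cands secs tv lv) (fun c => c.1) (fun c => c.2.1) with
     | none => none
     | some c => c.2.2) = pvB_first secs tv lv := by
  rw [min2?_eq_foldl, pvB_cands_eq_all, foldl_all _ _ _ _ hlv, tag_first]

theorem alt_eq_seq (mapping : List (String × List (String × Option String))) (cc ct : Option String) :
    normalize_contract_type_alt mapping cc ct = pvSeqAlt mapping cc ct := by
  cases ct with
  | none => rfl
  | some ct0 =>
    by_cases hct : ct0 = ""
    · simp [normalize_contract_type_alt, pvSeqAlt, hct]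
    · simp only [normalize_contract_type_alt, pvSeqAlt, if_neg hct]
      exact search_eq _ _ _ rfl

-- ===== VERDICT (by name: the statement is the Claim_ definition above) =====
theorem normalize_contract_type_spec : Claim_equal_normalize_contract_type := by
  intro m cc ct _
  unfold Spec_normalize_contract_type
  rw [A_eq_seq, alt_eq_seq]
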